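-- pv_equiv track=rewrite | github.com/AlexHayet/Phantom-Airlines | Phantom-Airlines.py | greedyPlacement
-- ===== SOURCE A (Python) =====
-- EMPTY = None
--
-- def distance(p1, p2):
--     # Computes the distance between two seats
--     return abs(p1[0] - p2[0]) + abs(p1[1] - p2[1])
--
-- def seatDistance(seat, assignedSeats):
--     # Computes a score for distance that tells how far a seat is from other party members,
--     # a higher score means a larger distance
--     return sum(distance(seat, other) for other in assignedSeats)
--
-- def greedyPlacement(plane, parties):
--     # Greedy algorithm that is designed to maximize party member seat distances
--     rows, cols = len(plane), len(plane[0]) # Dimensions of the plane seating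
--     partyPositions = {} # Dictionary that is used to keep track of seating positions
--
--     for partyID, party in enumerate(parties): # Iterate through the parties
--         placed = [] # Tracks the seat positions of the members of the party that is currenty being iterated through
--
--         for _ in party: # Place the party members
--             desiredSeat = None
--             bestScore = -1
--
--             for r in range(rows): # Go through each seat in the plane
--                 for c in range(cols):
--                     if plane[r][c] is EMPTY: # Checks if the seat is empty
--                         score = seatDistance((r, c), placed) # Computes the score (distance) that is used against currently seated party members
--                         if score > bestScore:
--                             bestScore = score
--                             desiredSeat = (r, c)
--
--             if desiredSeat: # Assigns the desired seat maximizes distance from party members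
--                 plane[desiredSeat[0]][desiredSeat[1]] = f"P{partyID}"
--                 placed.append(desiredSeat)
--
--         partyPositions[partyID] = placed # Updates placed with the positions of the party that has been placed
--     return plane, partyPositions # Returns the updates plane with the updated party seats
-- ===== SOURCE B (Python) =====
-- def greedyPlacement(plane, parties):
--     # Flat worklist of empty seats with incrementally maintained distance scores:
--     # each member is chosen by one max() over the scored list, which is then
--     # rebuilt (seat removed, distances added) by a single comprehension.
--     # Same in-place mutation of `plane` as the original.
--     cols = len(plane[0])
--     free = [(r, c) for r, row in enumerate(plane)
--                    for c, v in enumerate(row[:cols]) if v is None]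
--     partyPositions = {}
--     for partyID, party in enumerate(parties):
--         scored = [(0, seat) for seat in free]
--         placed = []
--         for _ in party:
--             if scored:
--                 _, (r, c) = max(scored, key=lambda t: t[0])
--                 plane[r][c] = f"P{partyID}"
--                 placed.append((r, c))
--                 scored = [(sc + abs(s[0] - r) + abs(s[1] - c), s)
--                           for sc, s in scored if s != (r, c)]
--         free = [seat for _, seat in scored]
--         partyPositions[partyID] = placed
--     return plane, partyPositions
-- ===== Notes on version B (the rewrite author's own statement) =====
-- stated objective: faster
-- what changed: Instead of re-scanning the whole grid and re-summing distances over all already-placed members for every seat, B keeps a flat worklist of empty seats with incrementally maintained distance scores: each member is chosen by one max() over that list, which is then rebuilt (chosen seat dropped, new distances added) by a single comprehension, so the per-seat member scan and the full-grid rescan disappear.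
import Mathlib
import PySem

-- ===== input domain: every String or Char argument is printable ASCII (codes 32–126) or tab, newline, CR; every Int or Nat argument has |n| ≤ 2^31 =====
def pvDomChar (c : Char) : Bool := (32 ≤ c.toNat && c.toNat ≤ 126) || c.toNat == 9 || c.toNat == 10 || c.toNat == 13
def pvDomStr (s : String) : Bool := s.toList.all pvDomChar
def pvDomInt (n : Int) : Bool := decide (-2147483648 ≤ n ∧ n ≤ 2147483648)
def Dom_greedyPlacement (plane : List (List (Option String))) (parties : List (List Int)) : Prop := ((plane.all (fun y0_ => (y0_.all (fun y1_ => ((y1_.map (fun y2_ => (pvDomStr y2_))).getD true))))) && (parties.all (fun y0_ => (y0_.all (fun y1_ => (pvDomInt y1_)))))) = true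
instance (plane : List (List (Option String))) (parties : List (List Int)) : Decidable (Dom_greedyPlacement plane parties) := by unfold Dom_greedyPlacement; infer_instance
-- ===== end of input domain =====

-- B replaces A's per-member full-grid rescan (re-summing distances over all placed
-- members at every seat) by a flat worklist of empty seats carrying incrementally
-- maintained distance scores, selected with max() and rebuilt by one comprehension
-- per placement. Same return value; both Pythons mutate `plane` in place identically.


-- ===== PORT A =====
-- distance(p1, p2)
def pvDist (p1 p2 : Int × Int) : Int := |p1.1 - p2.1| + |p1.2 - p2.2|

-- seatDistance(seat, assignedSeats): sum of distances (Python sum over a generator)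
def pvSeatDistance (seat : Int × Int) (assigned : List (Int × Int)) : Int :=
  assigned.foldl (fun acc other => acc + pvDist seat other) 0

-- plane[r][c]; r < rows and c < cols ≤ (row r).length whenever Pre_ holds, so the
-- getD defaults are never reached on admitted inputs
def pvSeatGet (plane : List (List (Option String))) (r c : Nat) : Option String :=
  (plane.getD r []).getD c none

-- plane[r][c] = v
def pvSetSeat (plane : List (List (Option String))) (r c : Nat) (v : String) :
    List (List (Option String)) :=
  plane.set r ((plane.getD r []).set c (some v))

-- A's inner double scan: (bestScore, desiredSeat), branches in A's order
def pvSelectA (plane : List (List (Option String))) (rows cols : Nat)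
    (placed : List (Int × Int)) : Int × Option (Nat × Nat) :=
  (List.range rows).foldl (fun st r =>
    (List.range cols).foldl (fun (st : Int × Option (Nat × Nat)) c =>
      match pvSeatGet plane r c with
      | none =>
        let score := pvSeatDistance ((r : Int), (c : Int)) placed
        if st.1 < score then (score, some (r, c)) else st
      | some _ => st) st) (-1, none)

-- one party member: scan, then (if a seat was found) seat the member
def pvPlaceA (pid : Int) (rows cols : Nat)
    (st : List (List (Option String)) × List (Int × Int)) :
    List (List (Option String)) × List (Int × Int) :=
  match (pvSelectA st.1 rows cols st.2).2 with
  | some (r, c) =>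
      (pvSetSeat st.1 r c ("P" ++ PySem.Int.toStr pid), st.2 ++ [((r : Int), (c : Int))])
  | none => st

def greedyPlacement (plane : List (List (Option String))) (parties : List (List Int)) : List (List (Option String)) × (List (Int × List (Int × Int))) :=
  let rows := plane.length
  let cols := (plane.headD []).length
  (PySem.List.enumerate parties).foldl
    (fun (st : List (List (Option String)) × List (Int × List (Int × Int))) pp =>
      let inner := pp.2.foldl (fun s _ => pvPlaceA pp.1 rows cols s) (st.1, [])
      (inner.1, st.2 ++ [(pp.1, inner.2)]))
    (plane, [])

-- ===== PORT B =====
-- [(r, c) for r, row in enumerate(plane) for c, v in enumerate(row[:cols]) if v is None]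
def pvFreeSeats (plane : List (List (Option String))) (cols : Nat) : List (Int × Int) :=
  (PySem.List.enumerate plane).flatMap (fun rrow =>
    ((PySem.List.enumerate (PySem.List.slice rrow.2 none (some (cols : Int)))).filter
        (fun cv => cv.2.isNone)).map (fun cv => (rrow.1, cv.1)))

-- one entry of the rebuilt comprehension: distances to the new seat added on
def pvBump (r c : Int) (t : Int × (Int × Int)) : Int × (Int × Int) :=
  (t.1 + |t.2.1 - r| + |t.2.2 - c|, t.2)

-- one party member on B's state (plane, placed, scored):
-- `if scored: max(...)` = match on max? (none exactly when scored == [])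
def pvPlaceB (pid : Int)
    (st : List (List (Option String)) × List (Int × Int) × List (Int × (Int × Int))) :
    List (List (Option String)) × List (Int × Int) × List (Int × (Int × Int)) :=
  match PySem.List.max? st.2.2 (fun t => t.1) with
  | none => st
  | some t =>
      let r := t.2.1
      let c := t.2.2
      (PySem.List.pySetD st.1 r
         (PySem.List.pySetD (PySem.List.pyGetD st.1 r []) c (some ("P" ++ PySem.Int.toStr pid))),
       st.2.1 ++ [(r, c)],
       (st.2.2.filter (fun u => u.2 ≠ (r, c))).map (pvBump r c))

def greedyPlacement_alt (plane : List (List (Option String))) (parties : List (List Int)) : List (List (Option String)) × (List (Int × List (Int × Int))) :=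
  let cols := (plane.headD []).length
  let fin := (PySem.List.enumerate parties).foldl
    (fun (st : List (List (Option String)) × List (Int × Int) × List (Int × List (Int × Int))) pp =>
      let inner := pp.2.foldl (fun s _ => pvPlaceB pp.1 s)
        (st.1, [], st.2.1.map (fun s => ((0 : Int), s)))
      (inner.1, inner.2.2.map (fun u => u.2), st.2.2 ++ [(pp.1, inner.2.1)]))
    (plane, pvFreeSeats plane cols, [])
  (fin.1, fin.2.2)

-- ===== PRECONDITION & SPEC =====
-- Pre_ excludes exactly the inputs where the Python A raises IndexError: an empty
-- plane (len(plane[0])), and a plane with some row shorter than the first row while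
-- some party member forces the seat scan to index it (plane[r][c] for c < cols).
def Pre_greedyPlacement (plane : List (List (Option String))) (parties : List (List Int)) : Prop :=
  plane ≠ [] ∧
    ((∀ row ∈ plane, (plane.headD []).length ≤ row.length) ∨ (∀ p ∈ parties, p = []))
instance (plane : List (List (Option String))) (parties : List (List Int)) : Decidable (Pre_greedyPlacement plane parties) := by unfold Pre_greedyPlacement; infer_instance
def pvWitness_greedyPlacement : List (List (Option String)) × List (List Int) :=
  ([[none, none], [none, some "X"]], [[1, 2], [3]])

def Spec_greedyPlacement (plane : List (List (Option String))) (parties : List (List Int)) (out : List (List (Option String)) × (List (Int × List (Int × Int)))) : Prop := out = greedyPlacement_alt plane parties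
instance (plane : List (List (Option String))) (parties : List (List Int)) (out : List (List (Option String)) × (List (Int × List (Int × Int)))) : Decidable (Spec_greedyPlacement plane parties out) := by unfold Spec_greedyPlacement; infer_instance

-- ===== CLAIM (what is proved, stated in full; the proofs are below) =====
def Claim_equal_greedyPlacement : Prop := ∀ (plane : List (List (Option String))) (parties : List (List Int)), Dom_greedyPlacement plane parties → Pre_greedyPlacement plane parties → Spec_greedyPlacement plane parties (greedyPlacement plane parties)

-- ===== LEMMAS AND PROOFS =====

-- the grid of seat coordinates in A's row-major scan order
def pvGrid (rows cols : Nat) : List (Nat × Nat) :=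
  (List.range rows).flatMap (fun r => (List.range cols).map (fun c => (r, c)))

-- the empty seats of the current plane, in row-major order
def pvEmpties (rows cols : Nat) (plane : List (List (Option String))) : List (Nat × Nat) :=
  (pvGrid rows cols).filter (fun rc => (pvSeatGet plane rc.1 rc.2).isNone)

def pvCast (rc : Nat × Nat) : Int × Int := ((rc.1 : Int), (rc.2 : Int))

-- B's loop invariant: plane shape is stable and scored lists exactly the empty
-- seats with their current party-distance scores
def pvInv (N cols : Nat) (plane : List (List (Option String)))
    (placed : List (Int × Int)) (scored : List (Int × (Int × Int))) : Prop :=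
  plane.length = N ∧ (∀ row ∈ plane, cols ≤ row.length) ∧
  scored = (pvEmpties N cols plane).map
    (fun rc => (pvSeatDistance (pvCast rc) placed, pvCast rc))

theorem pv_mem_grid (rows cols : Nat) (rc : Nat × Nat) :
    rc ∈ pvGrid rows cols ↔ rc.1 < rows ∧ rc.2 < cols := by
  obtain ⟨r, c⟩ := rc
  simp [pvGrid, List.mem_flatMap, eq_comm]

theorem pv_foldl_dist_mono (s : Int × Int) (l : List (Int × Int)) (acc : Int) :
    acc ≤ l.foldl (fun a o => a + pvDist s o) acc := by
  induction l generalizing acc with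
  | nil => simp
  | cons x xs ih =>
      simp only [List.foldl_cons]
      refine le_trans ?_ (ih (acc + pvDist s x))
      have : 0 ≤ pvDist s x := by unfold pvDist; positivity
      omega

theorem pvSeatDistance_nonneg (s : Int × Int) (l : List (Int × Int)) :
    0 ≤ pvSeatDistance s l := pv_foldl_dist_mono s l 0

theorem pvSeatDistance_append (s t : Int × Int) (l : List (Int × Int)) :
    pvSeatDistance s (l ++ [t]) = pvSeatDistance s l + pvDist s t := by
  simp [pvSeatDistance, List.foldl_append]

theorem pvCast_inj (a b : Nat × Nat) : pvCast a = pvCast b ↔ a = b := by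
  simp [pvCast, Prod.ext_iff]

-- A's double scan is the same fold over the row-major empty-seat list
theorem pvSelectA_eq_fold (plane : List (List (Option String))) (rows cols : Nat)
    (placed : List (Int × Int)) :
    pvSelectA plane rows cols placed
      = (pvEmpties rows cols plane).foldl
          (fun (st : Int × Option (Nat × Nat)) rc =>
            if st.1 < pvSeatDistance (pvCast rc) placed
            then (pvSeatDistance (pvCast rc) placed, some rc) else st)
          (-1, none) := by
  unfold pvEmpties pvGrid pvSelectA
  rw [List.foldl_filter, List.foldl_flatMap]
  congr 1
  funext st r
  rw [List.foldl_map]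
  congr 1
  funext st c
  cases h : pvSeatGet plane r c <;> simp [pvCast]

theorem pv_aux_run {α : Type} (f : α → Int) (l : List α) (m : α) :
    l.foldl (fun (st : Int × Option α) x =>
        if st.1 < f x then (f x, some x) else st) (f m, some m)
      = ((fun M => (f M, some M)) (l.foldl (fun m' x => if f m' < f x then x else m') m)) := by
  induction l generalizing m with
  | nil => rfl
  | cons x xs ih =>
      simp only [List.foldl_cons]
      by_cases h : f m < f x <;> simp [h, ih]

theorem pv_max?_cons {α : Type} (f : α → Int) (m : α) (l : List α) :
    PySem.List.max? (m :: l) f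
      = some (l.foldl (fun m' x => if f m' < f x then x else m') m) := by
  unfold PySem.List.max?
  simp only [List.foldl_cons]
  induction l generalizing m with
  | nil => rfl
  | cons x xs ih =>
      simp only [List.foldl_cons]
      by_cases h : f m < f x <;> simp [h, ih]

-- running argmax characterised by Python's first-maximum max()
theorem pv_argmax_char {α : Type} (f : α → Int) (l : List α)
    (hf : ∀ x ∈ l, 0 ≤ f x) :
    l.foldl (fun (st : Int × Option α) x =>
        if st.1 < f x then (f x, some x) else st) (-1, none)
      = (PySem.List.max? l f).elim ((-1 : Int), (none : Option α)) (fun m => (f m, some m)) := by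
  cases l with
  | nil => rfl
  | cons x xs =>
      have hx : (-1 : Int) < f x := by have := hf x (by simp); omega
      simp only [List.foldl_cons, hx, if_pos, pv_max?_cons, Option.elim_some]
      exact pv_aux_run f xs x

-- max over a mapped list
theorem pv_max?_map {α β : Type} (g : α → β) (k : β → Int) (l : List α) :
    PySem.List.max? (l.map g) k = (PySem.List.max? l (fun x => k (g x))).map g := by
  cases l with
  | nil => rfl
  | cons x xs =>
      rw [List.map_cons, pv_max?_cons, pv_max?_cons]
      simp only [Option.map_some]
      congr 1
      induction xs generalizing x with
      | nil => rfl
      | cons y ys ih =>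
          simp only [List.map_cons, List.foldl_cons]
          by_cases h : k (g x) < k (g y) <;> simp [h, ih]

theorem pv_getD_set_self {α : Type} (l : List α) (i : Nat) (h : i < l.length) (a d : α) :
    (l.set i a).getD i d = a := by
  rw [List.getD_eq_getElem?_getD, List.getElem?_set_self h]; rfl

theorem pv_getD_set_ne {α : Type} (l : List α) (i j : Nat) (h : i ≠ j) (a : α) (d : α) :
    (l.set i a).getD j d = l.getD j d := by
  rw [List.getD_eq_getElem?_getD, List.getElem?_set_ne h, ← List.getD_eq_getElem?_getD]

-- occupying one empty seat just deletes it from the empty-seat list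
theorem pvEmpties_set (N cols : Nat) (plane : List (List (Option String)))
    (hN : plane.length = N) (hrect : ∀ row ∈ plane, cols ≤ row.length)
    (M : Nat × Nat) (h1 : M.1 < N) (h2 : M.2 < cols)
    (hemp : pvSeatGet plane M.1 M.2 = none) (v : String) :
    pvEmpties N cols (pvSetSeat plane M.1 M.2 v)
      = (pvEmpties N cols plane).filter (fun rc => rc ≠ M) := by
  unfold pvEmpties
  rw [List.filter_filter]
  apply List.filter_congr
  intro rc hrc
  obtain ⟨hr, hc⟩ := (pv_mem_grid N cols rc).mp hrc
  have hlen : M.1 < plane.length := hN ▸ h1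
  have hrowmem : plane.getD M.1 [] ∈ plane := by
    rw [List.getD_eq_getElem _ _ hlen]; exact List.getElem_mem hlen
  have hrowlen : M.2 < (plane.getD M.1 []).length := lt_of_lt_of_le h2 (hrect _ hrowmem)
  by_cases hrc1 : rc.1 = M.1
  · by_cases hrc2 : rc.2 = M.2
    · have : rc = M := Prod.ext hrc1 hrc2
      subst this
      have : pvSeatGet (pvSetSeat plane rc.1 rc.2 v) rc.1 rc.2 = some v := by
        unfold pvSeatGet pvSetSeat
        rw [pv_getD_set_self _ _ hlen, pv_getD_set_self _ _ hrowlen]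
      simp [this]
    · have : pvSeatGet (pvSetSeat plane M.1 M.2 v) rc.1 rc.2 = pvSeatGet plane rc.1 rc.2 := by
        unfold pvSeatGet pvSetSeat
        rw [hrc1, pv_getD_set_self _ _ hlen,
          pv_getD_set_ne _ _ _ (fun h => hrc2 h.symm)]
      have hne : rc ≠ M := fun h => hrc2 (by rw [h])
      simp [this, hne]
  · have : pvSeatGet (pvSetSeat plane M.1 M.2 v) rc.1 rc.2 = pvSeatGet plane rc.1 rc.2 := by
      unfold pvSeatGet pvSetSeat
      rw [pv_getD_set_ne _ _ _ (fun h => hrc1 h.symm)]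
    have hne : rc ≠ M := fun h => hrc1 (by rw [h])
    simp [this, hne]

theorem pv_enum_take {α : Type} (k : Nat) (row : List α) (d : α) (s : Int)
    (hk : k ≤ row.length) :
    PySem.List.enumerate (row.take k) s
      = (List.range k).map (fun (c : Nat) => (s + (c : Int), row.getD c d)) := by
  induction k generalizing row s with
  | zero => simp
  | succ k ih =>
      cases row with
      | nil => simp at hk
      | cons a row' =>
          rw [List.take_succ_cons, PySem.List.enumerate_cons, List.range_succ_eq_map]
          rw [ih row' (s + 1) (by simpa using hk)]
          simp only [List.map_cons, List.map_map]
          refine congrArg₂ _ (by simp) ?_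
          refine List.map_congr_left ?_
          intro c _
          simp only [Function.comp]
          refine congrArg₂ _ (by push_cast; ring) (by rfl)

theorem pv_free_aux (cols : Nat) (pls : List (List (Option String))) (s : Nat)
    (hrect : ∀ row ∈ pls, cols ≤ row.length) :
    (PySem.List.enumerate pls ((s : Nat) : Int)).flatMap (fun rrow =>
      ((PySem.List.enumerate (PySem.List.slice rrow.2 none (some (cols : Int)))).filter
          (fun cv => cv.2.isNone)).map (fun cv => (rrow.1, cv.1)))
    = (List.range pls.length).flatMap (fun (r : Nat) =>
        ((List.range cols).filter (fun (c : Nat) => ((pls.getD r []).getD c none).isNone)).map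
          (fun (c : Nat) => ((((s + r : Nat)) : Int), (c : Int)))) := by
  induction pls generalizing s with
  | nil => simp
  | cons a pls' ih =>
      rw [PySem.List.enumerate_cons, List.flatMap_cons, List.length_cons,
        List.range_succ_eq_map, List.flatMap_cons, List.flatMap_map]
      refine congrArg₂ _ ?_ ?_
      · rw [PySem.List.slice_to_natCast,
          pv_enum_take cols a none 0 (hrect a (by simp)),
          List.filter_map, List.map_map]
        refine congrArg₂ _ (by funext c; simp) ?_
        refine List.filter_congr ?_
        intro c _
        simp [Function.comp]
      · have hs : ((s : Int) + 1) = (((s + 1 : Nat)) : Int) := by push_cast; ring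
        rw [hs, ih (s + 1) (fun row h => hrect row (by simp [h]))]
        refine List.flatMap_congr ?_
        intro r _
        · simp only [List.getD_cons_succ]
          refine List.map_congr_left ?_
          intro c _
          refine congrArg₂ _ ?_ (by rfl)
          congr 1
          omega

-- the initial free-seat comprehension is the row-major empty-seat list
theorem pvFreeSeats_eq (plane : List (List (Option String))) (cols : Nat)
    (hrect : ∀ row ∈ plane, cols ≤ row.length) :
    pvFreeSeats plane cols = (pvEmpties plane.length cols plane).map pvCast := by
  unfold pvFreeSeats pvEmpties pvGrid
  rw [List.filter_flatMap, List.map_flatMap]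
  have h0 : PySem.List.enumerate plane = PySem.List.enumerate plane (((0 : Nat) : Int)) := rfl
  rw [h0, pv_free_aux cols plane 0 hrect]
  refine List.flatMap_congr ?_
  intro r _
  rw [List.filter_map, List.map_map]
  refine congrArg₂ _ ?_ ?_
  · funext c
    simp [Function.comp, pvCast]
  · refine List.filter_congr ?_
    intro c _
    simp [Function.comp, pvSeatGet]

-- one member: the two steps stay in simulation
theorem pvPlace_sim (pid : Int) (N cols : Nat) (pl : List (List (Option String)))
    (placed : List (Int × Int)) (scored : List (Int × (Int × Int)))
    (h : pvInv N cols pl placed scored) :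
    pvPlaceB pid (pl, placed, scored)
      = ((pvPlaceA pid N cols (pl, placed)).1, (pvPlaceA pid N cols (pl, placed)).2,
         (pvPlaceB pid (pl, placed, scored)).2.2)
    ∧ pvInv N cols (pvPlaceA pid N cols (pl, placed)).1
        (pvPlaceA pid N cols (pl, placed)).2 (pvPlaceB pid (pl, placed, scored)).2.2 := by
  obtain ⟨hN, hrect, hscored⟩ := h
  have hsel : pvSelectA pl N cols placed
      = (PySem.List.max? (pvEmpties N cols pl)
            (fun rc => pvSeatDistance (pvCast rc) placed)).elim
          ((-1 : Int), (none : Option (Nat × Nat)))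
          (fun m => (pvSeatDistance (pvCast m) placed, some m)) := by
    rw [pvSelectA_eq_fold]
    exact pv_argmax_char (fun rc => pvSeatDistance (pvCast rc) placed)
      (pvEmpties N cols pl) (fun x _ => pvSeatDistance_nonneg _ _)
  have hmaxB : PySem.List.max? scored (fun t => t.1)
      = (PySem.List.max? (pvEmpties N cols pl)
          (fun rc => pvSeatDistance (pvCast rc) placed)).map
          (fun rc => (pvSeatDistance (pvCast rc) placed, pvCast rc)) := by
    rw [hscored, pv_max?_map]
  cases hmax : PySem.List.max? (pvEmpties N cols pl)
      (fun rc => pvSeatDistance (pvCast rc) placed) with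
  | none =>
      have hA : pvPlaceA pid N cols (pl, placed) = (pl, placed) := by
        unfold pvPlaceA; rw [hsel, hmax]; rfl
      have hB : pvPlaceB pid (pl, placed, scored) = (pl, placed, scored) := by
        unfold pvPlaceB; rw [hmaxB, hmax]; rfl
      rw [hA, hB]
      exact ⟨rfl, hN, hrect, hscored⟩
  | some M =>
      obtain ⟨m1, m2⟩ := M
      have hMmem : (m1, m2) ∈ pvEmpties N cols pl := PySem.List.max?_mem hmax
      have hMgrid := (List.mem_filter.mp hMmem).1
      obtain ⟨hM1, hM2⟩ := (pv_mem_grid N cols (m1, m2)).mp hMgrid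
      have hMemp : pvSeatGet pl m1 m2 = none := by
        have := (List.mem_filter.mp hMmem).2
        simpa [Option.isNone_iff_eq_none] using this
      have hA : pvPlaceA pid N cols (pl, placed)
          = (pvSetSeat pl m1 m2 ("P" ++ PySem.Int.toStr pid),
             placed ++ [pvCast (m1, m2)]) := by
        unfold pvPlaceA; rw [hsel, hmax]; rfl
      have hB : pvPlaceB pid (pl, placed, scored)
          = (pvSetSeat pl m1 m2 ("P" ++ PySem.Int.toStr pid),
             placed ++ [pvCast (m1, m2)],
             (scored.filter (fun u => u.2 ≠ pvCast (m1, m2))).map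
               (pvBump (m1 : Int) (m2 : Int))) := by
        unfold pvPlaceB
        rw [hmaxB, hmax]
        simp only [Option.map_some]
        unfold pvSetSeat
        simp [pvCast]
      have hscored' :
          (scored.filter (fun u => u.2 ≠ pvCast (m1, m2))).map (pvBump (m1 : Int) (m2 : Int))
          = (pvEmpties N cols (pvSetSeat pl m1 m2 ("P" ++ PySem.Int.toStr pid))).map
              (fun rc => (pvSeatDistance (pvCast rc) (placed ++ [pvCast (m1, m2)]), pvCast rc)) := by
        rw [pvEmpties_set N cols pl hN hrect (m1, m2) hM1 hM2 hMemp, hscored,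
          List.filter_map, List.map_map]
        refine congrArg₂ _ ?_ ?_
        · funext rc
          simp only [Function.comp, pvBump, pvSeatDistance_append, pvDist, pvCast]
          refine congrArg₂ _ (by ring) (by rfl)
        · refine List.filter_congr ?_
          intro rc _
          simp [Function.comp, pvCast_inj]
      refine ⟨?_, ?_⟩
      · rw [hA, hB]
      · rw [hA, hB]
        refine ⟨by simp [pvSetSeat, hN], ?_, hscored'⟩
        intro row hrow
        rcases List.mem_or_eq_of_mem_set hrow with hmem | heq
        · exact hrect row hmem
        · subst heq
          rw [List.length_set]
          have hlen : m1 < pl.length := hN ▸ hM1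
          have : pl.getD m1 [] ∈ pl := by
            rw [List.getD_eq_getElem _ _ hlen]; exact List.getElem_mem hlen
          exact hrect _ this

-- one party: the member loop stays in simulation
theorem pvLoop_sim (pid : Int) (N cols : Nat) (party : List Int)
    (pl : List (List (Option String))) (placed : List (Int × Int))
    (scored : List (Int × (Int × Int))) (h : pvInv N cols pl placed scored) :
    (party.foldl (fun s _ => pvPlaceB pid s) (pl, placed, scored)).1
        = (party.foldl (fun s _ => pvPlaceA pid N cols s) (pl, placed)).1
    ∧ (party.foldl (fun s _ => pvPlaceB pid s) (pl, placed, scored)).2.1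
        = (party.foldl (fun s _ => pvPlaceA pid N cols s) (pl, placed)).2
    ∧ pvInv N cols (party.foldl (fun s _ => pvPlaceA pid N cols s) (pl, placed)).1
        (party.foldl (fun s _ => pvPlaceA pid N cols s) (pl, placed)).2
        (party.foldl (fun s _ => pvPlaceB pid s) (pl, placed, scored)).2.2 := by
  induction party generalizing pl placed scored with
  | nil => exact ⟨rfl, rfl, h⟩
  | cons x xs ih =>
      simp only [List.foldl_cons]
      obtain ⟨hstep, hinv⟩ := pvPlace_sim pid N cols pl placed scored h
      rw [hstep]
      exact ih (pvPlaceA pid N cols (pl, placed)).1 (pvPlaceA pid N cols (pl, placed)).2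
        (pvPlaceB pid (pl, placed, scored)).2.2 hinv

-- the outer party loop, under the invariant free = empties
theorem pvOuter_sim (N cols : Nat) (l : List (Int × List Int))
    (pl : List (List (Option String))) (acc : List (Int × List (Int × Int)))
    (hN : pl.length = N) (hrect : ∀ row ∈ pl, cols ≤ row.length) :
    (l.foldl
      (fun (st : List (List (Option String)) × List (Int × Int) × List (Int × List (Int × Int))) pp =>
        let inner := pp.2.foldl (fun s _ => pvPlaceB pp.1 s)
          (st.1, [], st.2.1.map (fun s => ((0 : Int), s)))
        (inner.1, inner.2.2.map (fun u => u.2), st.2.2 ++ [(pp.1, inner.2.1)]))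
      (pl, (pvEmpties N cols pl).map pvCast, acc))
    = (fun a : List (List (Option String)) × List (Int × List (Int × Int)) =>
        (a.1, (pvEmpties N cols a.1).map pvCast, a.2))
      (l.foldl
        (fun (st : List (List (Option String)) × List (Int × List (Int × Int))) pp =>
          let inner := pp.2.foldl (fun s _ => pvPlaceA pp.1 N cols s) (st.1, [])
          (inner.1, st.2 ++ [(pp.1, inner.2)])) (pl, acc)) := by
  induction l generalizing pl acc with
  | nil => rfl
  | cons pp l' ih =>
      simp only [List.foldl_cons]
      have hinv0 : pvInv N cols pl []
          (((pvEmpties N cols pl).map pvCast).map (fun s => ((0 : Int), s))) := by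
        refine ⟨hN, hrect, ?_⟩
        rw [List.map_map]
        rfl
      obtain ⟨h1, h2, hinv⟩ := pvLoop_sim pp.1 N cols pp.2 pl []
        (((pvEmpties N cols pl).map pvCast).map (fun s => ((0 : Int), s))) hinv0
      obtain ⟨hN', hrect', hscored'⟩ := hinv
      rw [h1, h2, hscored', List.map_map]
      rw [show (((fun (u : Int × Int × Int) => u.2) ∘ fun rc =>
          (pvSeatDistance (pvCast rc)
            (pp.2.foldl (fun s _ => pvPlaceA pp.1 N cols s) (pl, [])).2, pvCast rc)))
          = pvCast from rfl]
      exact ih _ _ hN' hrect'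

-- the degenerate branch of Pre_: every party is empty, so neither side places anyone
theorem pvOuter_empty (N cols : Nat) (l : List (Int × List Int))
    (hl : ∀ pp ∈ l, pp.2 = ([] : List Int))
    (pl : List (List (Option String))) (free : List (Int × Int))
    (acc : List (Int × List (Int × Int))) :
    (l.foldl
      (fun (st : List (List (Option String)) × List (Int × Int) × List (Int × List (Int × Int))) pp =>
        let inner := pp.2.foldl (fun s _ => pvPlaceB pp.1 s)
          (st.1, [], st.2.1.map (fun s => ((0 : Int), s)))
        (inner.1, inner.2.2.map (fun u => u.2), st.2.2 ++ [(pp.1, inner.2.1)]))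
      (pl, free, acc))
    = (fun a : List (List (Option String)) × List (Int × List (Int × Int)) =>
        (a.1, free, a.2))
      (l.foldl
        (fun (st : List (List (Option String)) × List (Int × List (Int × Int))) pp =>
          let inner := pp.2.foldl (fun s _ => pvPlaceA pp.1 N cols s) (st.1, [])
          (inner.1, st.2 ++ [(pp.1, inner.2)])) (pl, acc)) := by
  induction l generalizing pl acc with
  | nil => rfl
  | cons pp l' ih =>
      have hpp : pp.2 = ([] : List Int) := hl pp (by simp)
      simp only [List.foldl_cons, hpp, List.foldl_nil]
      rw [List.map_map]
      have : ((fun (u : Int × Int × Int) => u.2) ∘ fun s => ((0 : Int), s))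
          = (fun s => s) := rfl
      rw [this, List.map_id']
      exact ih (fun q hq => hl q (by simp [hq])) pl (acc ++ [(pp.1, [])])

-- ===== VERDICT (by name: the statement is the Claim_ definition above) =====
theorem greedyPlacement_spec : Claim_equal_greedyPlacement := by
  intro plane parties _ hpre
  obtain ⟨hne, hcase⟩ := hpre
  show greedyPlacement plane parties = greedyPlacement_alt plane parties
  simp only [greedyPlacement, greedyPlacement_alt]
  rcases hcase with hrect | hempty
  · rw [pvFreeSeats_eq plane _ hrect,
      pvOuter_sim plane.length (plane.headD []).length (PySem.List.enumerate parties)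
        plane [] rfl hrect]
  · have hl : ∀ pp ∈ PySem.List.enumerate parties, pp.2 = ([] : List Int) := by
      intro pp hpp
      have : pp.2 ∈ (PySem.List.enumerate parties).map (fun q => q.2) :=
        List.mem_map_of_mem hpp
      rw [PySem.List.map_snd_enumerate] at this
      exact hempty _ this
    rw [pvOuter_empty plane.length (plane.headD []).length _ hl plane
      (pvFreeSeats plane ((plane.headD []).length)) []]
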